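-- pv_equiv track=rewrite | github.com/fernandovbs/wordpress_manager | plugins.py | response_bundle
-- ===== SOURCE A (Python) =====
-- def response_bundle(response):
--     response_bundle = {}
--     active_bundle, inactive_bundle = (False, False)
--
--     for key, items in response['active'].items():
--         if key not in response_bundle:
--             response_bundle[key] = {}
--         response_bundle[key]['active'] = items['active']
--
--     for key, items in response['inactive'].items():
--         if key not in response_bundle:
--             response_bundle[key] = {}
--         response_bundle[key]['inactive'] = items['inactive']
--
--     return response_bundle
-- ===== SOURCE B (Python) =====
-- def response_bundle(response):
--     active = response['active']
--     inactive = response['inactive']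
--
--     def inactive_only(items):
--         # entries for keys that appear only in 'inactive', built recursively
--         if not items:
--             return {}
--         (key, val) = items[0]
--         tail = inactive_only(items[1:])
--         if key in active:
--             return tail
--         return {key: {'inactive': val['inactive']}, **tail}
--
--     def merged(items):
--         # one entry per active key (pulling the inactive field if present),
--         # then the inactive-only tail; the dict is assembled back-to-front
--         if not items:
--             return inactive_only(list(inactive.items()))
--         (key, val) = items[0]
--         entry = {'active': val['active']}
--         if key in inactive:
--             entry['inactive'] = inactive[key]['inactive']
--         return {key: entry, **merged(items[1:])}
--
--     return merged(list(active.items()))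
-- ===== Notes on version B (the rewrite author's own statement) =====
-- stated objective: alternative
-- what changed: A mutates a shared dict with two staged create-or-update passes (setdefault-style); B is a pure recursion that assembles the result back-to-front with no mutation, consing one complete entry per active key and then recursively building the inactive-only tail.
-- outside the precondition, e.g. on response_bundle({}): A raises KeyError, B raises KeyError
import Mathlib
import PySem

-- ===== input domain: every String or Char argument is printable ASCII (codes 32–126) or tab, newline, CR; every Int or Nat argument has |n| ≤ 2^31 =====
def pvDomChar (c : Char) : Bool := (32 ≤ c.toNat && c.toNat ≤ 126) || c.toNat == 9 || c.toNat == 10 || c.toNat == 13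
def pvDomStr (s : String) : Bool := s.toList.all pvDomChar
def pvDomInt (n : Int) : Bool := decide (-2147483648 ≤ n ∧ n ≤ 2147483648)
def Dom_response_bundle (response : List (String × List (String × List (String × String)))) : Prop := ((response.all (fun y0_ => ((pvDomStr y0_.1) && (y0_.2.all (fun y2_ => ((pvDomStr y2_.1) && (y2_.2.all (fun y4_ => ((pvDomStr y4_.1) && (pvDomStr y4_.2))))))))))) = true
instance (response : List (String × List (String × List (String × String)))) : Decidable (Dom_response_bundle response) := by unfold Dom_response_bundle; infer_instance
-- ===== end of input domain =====

-- ===== PORT A =====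
-- B replaces A's two mutating create-or-update passes by a pure back-to-front recursion (objective: alternative).
-- helper: v = items[field]  (Python dict lookup on the inner dict)
def pvField (items : List (String × String)) (field : String) : String :=
  (PySem.Dict.ofList items).getD field ""

def response_bundle (response : List (String × List (String × List (String × String)))) : List (String × List (String × String)) :=
  let resp := PySem.Dict.ofList response
  let active := PySem.Dict.ofList (resp.getD "active" [])
  let inactive := PySem.Dict.ofList (resp.getD "inactive" [])
  -- for key, items in response['active'].items(): setdefault {}; bundle[key]['active'] = items['active']
  let bundle : PySem.Dict String (PySem.Dict String String) :=
    active.items.foldl (fun d p =>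
      (d.setdefault p.1 PySem.Dict.empty).modify p.1 PySem.Dict.empty
        (fun inner => inner.insert "active" (pvField p.2 "active"))) PySem.Dict.empty
  -- for key, items in response['inactive'].items(): setdefault {}; bundle[key]['inactive'] = items['inactive']
  let bundle :=
    inactive.items.foldl (fun d p =>
      (d.setdefault p.1 PySem.Dict.empty).modify p.1 PySem.Dict.empty
        (fun inner => inner.insert "inactive" (pvField p.2 "inactive"))) bundle
  bundle.items.map (fun q => (q.1, q.2.items))

-- ===== PORT B =====
-- def inactive_only(items): recursion over the inactive items, skipping keys already active.
-- `{key: entry, **tail}` is ported as a cons: the keys drawn from .items are pairwise distinct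
-- and the tail's keys come later in the same items list, so no overwrite/reorder can occur.
def pvInactiveOnly (act : PySem.Dict String (List (String × String))) :
    List (String × List (String × String)) → List (String × List (String × String))
  | [] => []
  | (k, v) :: rest =>
      let tail := pvInactiveOnly act rest
      if act.contains k then tail
      else (k, ((PySem.Dict.empty : PySem.Dict String String).insert "inactive" (pvField v "inactive")).items) :: tail

-- def merged(items): one complete entry per active key, then the inactive-only tail.
def pvMerged (act inact : PySem.Dict String (List (String × String))) :
    List (String × List (String × String)) → List (String × List (String × String))
  | [] => pvInactiveOnly act inact.items
  | (k, v) :: rest =>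
      let e := (PySem.Dict.empty : PySem.Dict String String).insert "active" (pvField v "active")
      let e := if inact.contains k then e.insert "inactive" (pvField (inact.getD k []) "inactive") else e
      (k, e.items) :: pvMerged act inact rest

def response_bundle_alt (response : List (String × List (String × List (String × String)))) : List (String × List (String × String)) :=
  let resp := PySem.Dict.ofList response
  let active := PySem.Dict.ofList (resp.getD "active" [])
  let inactive := PySem.Dict.ofList (resp.getD "inactive" [])
  pvMerged active inactive active.items

-- ===== PRECONDITION & SPEC =====
-- Pre_ excludes exactly the inputs on which A raises KeyError: a missing 'active'/'inactive'
-- top-level key, or an item of response['active'] (resp. ['inactive']) lacking its 'active'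
-- (resp. 'inactive') field.
def Pre_response_bundle (response : List (String × List (String × List (String × String)))) : Prop :=
  (PySem.Dict.ofList response).contains "active" = true ∧
  (PySem.Dict.ofList response).contains "inactive" = true ∧
  (∀ p ∈ (PySem.Dict.ofList ((PySem.Dict.ofList response).getD "active" [])).items,
      (PySem.Dict.ofList p.2).contains "active" = true) ∧
  (∀ p ∈ (PySem.Dict.ofList ((PySem.Dict.ofList response).getD "inactive" [])).items,
      (PySem.Dict.ofList p.2).contains "inactive" = true)

instance (response : List (String × List (String × List (String × String)))) : Decidable (Pre_response_bundle response) := by unfold Pre_response_bundle; infer_instance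

def pvWitness_response_bundle : (List (String × List (String × List (String × String)))) :=
  [("active", [("p1", [("active", "1")]), ("p2", [("active", "0")])]),
   ("inactive", [("p2", [("inactive", "x")]), ("p3", [("inactive", "y")])])]

def Spec_response_bundle (response : List (String × List (String × List (String × String)))) (out : List (String × List (String × String))) : Prop := out = response_bundle_alt response
instance (response : List (String × List (String × List (String × String)))) (out : List (String × List (String × String))) : Decidable (Spec_response_bundle response out) := by unfold Spec_response_bundle; infer_instance

-- ===== CLAIM (what is proved, stated in full; the proofs are below) =====
def Claim_equal_response_bundle : Prop := ∀ (response : List (String × List (String × List (String × String)))), Dom_response_bundle response → Pre_response_bundle response → Spec_response_bundle response (response_bundle response)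

-- ===== LEMMAS AND PROOFS =====

-- the loop body both of A's passes use: setdefault {} then bundle[key][fld] = items[fld]
def pvStep (fld : String) (d : PySem.Dict String (PySem.Dict String String))
    (p : String × List (String × String)) : PySem.Dict String (PySem.Dict String String) :=
  (d.setdefault p.1 PySem.Dict.empty).modify p.1 PySem.Dict.empty
    (fun inner => inner.insert fld (pvField p.2 fld))

-- the entry appended for a fresh key
def pvNew (fld : String) (p : String × List (String × String)) : String × PySem.Dict String String :=
  (p.1, PySem.Dict.empty.insert fld (pvField p.2 fld))

-- the in-place update a pass performs on an existing entry
def pvUpd (fld : String) (b : PySem.Dict String (List (String × String)))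
    (q : String × PySem.Dict String String) : String × PySem.Dict String String :=
  if b.contains q.1 then (q.1, q.2.insert fld (pvField (b.getD q.1 []) fld)) else q

lemma pvStep_items_contains (fld : String) (d : PySem.Dict String (PySem.Dict String String))
    (k : String) (it : List (String × String)) (h : d.contains k = true) :
    (pvStep fld d (k, it)).items
      = d.items.map (fun q => if q.1 == k then (k, (d.getD k PySem.Dict.empty).insert fld (pvField it fld)) else q) := by
  unfold pvStep
  rw [PySem.Dict.setdefault_of_contains _ _ h]
  simp only [PySem.Dict.modify]
  rw [PySem.Dict.items_insert_of_contains _ _ h]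

lemma pvStep_items_not_contains (fld : String) (d : PySem.Dict String (PySem.Dict String String))
    (k : String) (it : List (String × String)) (h : d.contains k = false) :
    (pvStep fld d (k, it)).items = d.items ++ [(k, PySem.Dict.empty.insert fld (pvField it fld))] := by
  unfold pvStep
  rw [PySem.Dict.setdefault_of_not_contains _ _ h]
  simp only [PySem.Dict.modify]
  rw [PySem.Dict.getD_insert_self, PySem.Dict.insert_insert_self,
      PySem.Dict.items_insert_of_not_contains _ _ h]

lemma pvStep_keys (fld : String) (d : PySem.Dict String (PySem.Dict String String))
    (p : String × List (String × String)) :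
    (pvStep fld d p).keys = if d.contains p.1 then d.keys else d.keys ++ [p.1] := by
  by_cases h : d.contains p.1 = true
  · rw [if_pos h]
    show ((pvStep fld d (p.1, p.2)).items.map Prod.fst) = d.keys
    rw [pvStep_items_contains fld d p.1 p.2 h, List.map_map]
    refine List.map_congr_left (fun q _ => ?_)
    by_cases hq : q.1 = p.1
    all_goals simp_all
  · rw [if_neg h]
    rw [Bool.not_eq_true] at h
    show ((pvStep fld d (p.1, p.2)).items.map Prod.fst) = d.keys ++ [p.1]
    rw [pvStep_items_not_contains fld d p.1 p.2 h]
    simp [PySem.Dict.keys]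

lemma pvStep_keys_nodup (fld : String) (d : PySem.Dict String (PySem.Dict String String))
    (p : String × List (String × String)) (h : d.keys.Nodup) : (pvStep fld d p).keys.Nodup := by
  rw [pvStep_keys]
  by_cases hc : d.contains p.1 = true
  · simp [hc, h]
  · rw [Bool.not_eq_true] at hc
    have : p.1 ∉ d.keys := by
      intro hm
      rw [← PySem.Dict.contains_iff_mem_keys] at hm
      simp [hm] at hc
    rw [if_neg (by simp [hc])]
    exact List.Nodup.append h (List.nodup_singleton _)
      (fun a ha hb => this (by rwa [show a = p.1 by simpa using hb] at ha))

lemma pvStep_contains (fld : String) (d : PySem.Dict String (PySem.Dict String String))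
    (p : String × List (String × String)) (j : String) :
    (pvStep fld d p).contains j = (j == p.1 || d.contains j) := by
  rw [PySem.Dict.contains_eq_decide_mem_keys, PySem.Dict.contains_eq_decide_mem_keys, pvStep_keys]
  by_cases hc : d.contains p.1 = true
  · rw [if_pos hc]
    by_cases hj : j = p.1
    · subst hj
      rw [← PySem.Dict.contains_eq_decide_mem_keys, hc]
      simp
    · simp [hj]
  · rw [if_neg hc]
    by_cases hj : j = p.1 <;> simp [hj]

-- the central loop invariant: one create-or-update pass maps existing entries and appends fresh ones
lemma pvFoldl_step_items (fld : String) (lb : List (String × List (String × String)))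
    (d : PySem.Dict String (PySem.Dict String String))
    (hlb : (lb.map Prod.fst).Nodup) (hd : d.keys.Nodup) :
    (lb.foldl (pvStep fld) d).items
      = d.items.map (pvUpd fld (PySem.Dict.mk lb))
          ++ (lb.filter (fun p => !(d.contains p.1))).map (pvNew fld) := by
  induction lb generalizing d with
  | nil =>
    simp only [List.foldl_nil, List.filter_nil, List.map_nil, List.append_nil]
    have h0 : ∀ q, pvUpd fld (PySem.Dict.mk []) q = q := by
      intro q
      simp [pvUpd, PySem.Dict.contains_mk]
    rw [show d.items.map (pvUpd fld (PySem.Dict.mk [])) = d.items from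
      (List.map_congr_left fun q _ => h0 q).trans (List.map_id _)]
  | cons p rest ih =>
    simp only [List.map_cons, List.nodup_cons] at hlb
    obtain ⟨hp, hrest⟩ := hlb
    obtain ⟨p1, p2⟩ := p
    simp only at hp
    have hmkrest : (PySem.Dict.mk rest).contains p1 = false := by
      rw [PySem.Dict.contains_mk]
      simp only [List.any_eq_false]
      intro q hq hbeq
      exact hp (by rw [← (by simpa using hbeq : q.1 = p1)]; exact List.mem_map_of_mem hq)
    have hcons_contains : ∀ j, (PySem.Dict.mk ((p1, p2) :: rest)).contains j
        = (j == p1 || (PySem.Dict.mk rest).contains j) := by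
      intro j
      rw [PySem.Dict.contains_mk, PySem.Dict.contains_mk]
      by_cases hj : j = p1 <;> simp [hj, BEq.comm]
    have hcons_getD : ∀ j, j ≠ p1 →
        (PySem.Dict.mk ((p1, p2) :: rest)).getD j [] = (PySem.Dict.mk rest).getD j [] := by
      intro j hj
      rw [PySem.Dict.getD_eq_get?_getD, PySem.Dict.getD_eq_get?_getD, PySem.Dict.get?_mk_cons]
      rw [if_neg (by simpa using fun h => hj h.symm)]
    have hcons_getD_self : (PySem.Dict.mk ((p1, p2) :: rest)).getD p1 [] = p2 := by
      rw [PySem.Dict.getD_eq_get?_getD, PySem.Dict.get?_mk_cons]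
      simp
    have hfilter : rest.filter (fun q => !(pvStep fld d (p1, p2)).contains q.1)
        = rest.filter (fun q => !d.contains q.1) := by
      refine List.filter_congr (fun q hq => ?_)
      rw [pvStep_contains]
      have hne : (q.1 == p1) = false := by
        simp only [beq_eq_false_iff_ne, ne_eq]
        intro h
        exact hp (h ▸ List.mem_map_of_mem hq)
      rw [hne, Bool.false_or]
    simp only [List.foldl_cons]
    rw [ih _ hrest (pvStep_keys_nodup fld d _ hd)]
    by_cases hc : d.contains p1 = true
    · -- existing key: the step maps d.items in place
      rw [pvStep_items_contains fld d p1 p2 hc]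
      rw [List.map_map]
      have e1 : d.items.map (pvUpd fld (PySem.Dict.mk rest) ∘
            fun q => if q.1 == p1 then (p1, (d.getD p1 PySem.Dict.empty).insert fld (pvField p2 fld)) else q)
          = d.items.map (pvUpd fld (PySem.Dict.mk ((p1, p2) :: rest))) := by
        refine List.map_congr_left (fun q hq => ?_)
        simp only [Function.comp]
        by_cases hq1 : q.1 = p1
        · have hqv : q.2 = d.getD p1 PySem.Dict.empty := by
            have hmem : (p1, q.2) ∈ d.items := by
              rw [← hq1]
              exact hq
            exact (PySem.Dict.getD_of_mem_items d hmem hd _).symm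
          rw [if_pos (show (q.1 == p1) = true by simpa using hq1)]
          simp only [pvUpd]
          rw [if_neg (show ¬ (PySem.Dict.mk rest).contains p1 = true by simp [hmkrest])]
          rw [if_pos (show (PySem.Dict.mk ((p1, p2) :: rest)).contains q.1 = true by
            rw [hcons_contains]; simp [hq1])]
          rw [hq1, hcons_getD_self, hqv]
        · rw [if_neg (show ¬ (q.1 == p1) = true by simpa using hq1)]
          simp only [pvUpd]
          rw [hcons_contains q.1, show (q.1 == p1) = false by simpa using hq1, Bool.false_or]
          by_cases hbc : (PySem.Dict.mk rest).contains q.1 = true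
          · rw [if_pos hbc, if_pos hbc, hcons_getD q.1 hq1]
          · rw [Bool.not_eq_true] at hbc
            rw [if_neg (by simp [hbc]), if_neg (by simp [hbc])]
      rw [e1, hfilter, List.filter_cons, if_neg (by simp [hc])]
    · -- fresh key: the step appends the new entry
      rw [Bool.not_eq_true] at hc
      rw [pvStep_items_not_contains fld d p1 p2 hc]
      rw [List.map_append]
      have hnotin : p1 ∉ d.keys := by
        intro hm
        rw [← PySem.Dict.contains_iff_mem_keys] at hm
        simp [hm] at hc
      have e1 : d.items.map (pvUpd fld (PySem.Dict.mk rest))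
          = d.items.map (pvUpd fld (PySem.Dict.mk ((p1, p2) :: rest))) := by
        refine List.map_congr_left (fun q hq => ?_)
        have hq1 : q.1 ≠ p1 := by
          intro h
          exact hnotin (h ▸ List.mem_map_of_mem hq)
        simp only [pvUpd]
        rw [hcons_contains q.1, show (q.1 == p1) = false by simpa using hq1, Bool.false_or]
        by_cases hbc : (PySem.Dict.mk rest).contains q.1 = true
        · rw [if_pos hbc, if_pos hbc, hcons_getD q.1 hq1]
        · rw [Bool.not_eq_true] at hbc
          rw [if_neg (by simp [hbc]), if_neg (by simp [hbc])]
      have e2 : [(p1, PySem.Dict.empty.insert fld (pvField p2 fld))].map (pvUpd fld (PySem.Dict.mk rest))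
          = [pvNew fld (p1, p2)] := by
        simp only [List.map_cons, List.map_nil, pvUpd, pvNew]
        rw [if_neg (by simp [hmkrest])]
      rw [e1, e2, hfilter, List.filter_cons, if_pos (by simp [hc]), List.map_cons]
      simp

-- B's recursion on the inactive-only tail, characterised as a filter-map
lemma pvInactiveOnly_eq (act : PySem.Dict String (List (String × String)))
    (l : List (String × List (String × String))) :
    pvInactiveOnly act l
      = (l.filter (fun p => !(act.contains p.1))).map (fun p => ((pvNew "inactive" p).1, (pvNew "inactive" p).2.items)) := by
  induction l with
  | nil => rfl
  | cons p rest ih =>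
    obtain ⟨k, v⟩ := p
    simp only [pvInactiveOnly, List.filter_cons]
    by_cases hc : act.contains k = true
    · rw [if_pos hc, if_neg (by simp [hc]), ih]
    · rw [Bool.not_eq_true] at hc
      rw [if_neg (by simp [hc]), if_pos (by simp [hc]), List.map_cons, ih]
      rfl

-- B's main recursion, characterised as a map over the active items plus the tail
lemma pvMerged_eq (act inact : PySem.Dict String (List (String × String)))
    (l : List (String × List (String × String))) :
    pvMerged act inact l
      = l.map (fun p => ((pvUpd "inactive" inact (pvNew "active" p)).1,
                         (pvUpd "inactive" inact (pvNew "active" p)).2.items))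
          ++ pvInactiveOnly act inact.items := by
  induction l with
  | nil => simp [pvMerged]
  | cons p rest ih =>
    obtain ⟨k, v⟩ := p
    simp only [pvMerged, List.map_cons, List.cons_append, ih]
    congr 1
    simp only [pvUpd, pvNew]
    by_cases hc : inact.contains k = true
    · rw [if_pos hc, if_pos hc]
    · rw [Bool.not_eq_true] at hc
      rw [if_neg (by simp [hc]), if_neg (by simp [hc])]

-- both ports, written in closed form (definitional)
lemma pvPortA_eq (response : List (String × List (String × List (String × String)))) :
    response_bundle response
      = ((PySem.Dict.ofList ((PySem.Dict.ofList response).getD "inactive" [])).items.foldl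
            (pvStep "inactive")
            ((PySem.Dict.ofList ((PySem.Dict.ofList response).getD "active" [])).items.foldl
              (pvStep "active") PySem.Dict.empty)).items.map (fun q => (q.1, q.2.items)) := rfl

lemma pvPortB_eq (response : List (String × List (String × List (String × String)))) :
    response_bundle_alt response
      = pvMerged (PySem.Dict.ofList ((PySem.Dict.ofList response).getD "active" []))
                 (PySem.Dict.ofList ((PySem.Dict.ofList response).getD "inactive" []))
                 (PySem.Dict.ofList ((PySem.Dict.ofList response).getD "active" [])).items := rfl

lemma pvEmptyItems : (PySem.Dict.empty : PySem.Dict String (PySem.Dict String String)).items = [] := rfl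

-- A's two passes and B's recursion produce the same list
lemma pvAssemble (a b : PySem.Dict String (List (String × String)))
    (ha : a.keys.Nodup) (hb : b.keys.Nodup) :
    (b.items.foldl (pvStep "inactive") (a.items.foldl (pvStep "active") PySem.Dict.empty)).items.map
        (fun q => (q.1, q.2.items))
      = pvMerged a b a.items := by
  have hbkeys : (b.items.map Prod.fst).Nodup := hb
  have hakeys : (a.items.map Prod.fst).Nodup := ha
  -- first pass
  have hA1 : (a.items.foldl (pvStep "active") PySem.Dict.empty).items
      = a.items.map (pvNew "active") := by
    rw [pvFoldl_step_items "active" a.items PySem.Dict.empty hakeys (by simp [PySem.Dict.keys_empty])]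
    rw [show a.items.filter (fun p => !(PySem.Dict.empty : PySem.Dict String (PySem.Dict String String)).contains p.1) = a.items from
      List.filter_congr (fun p _ => by simp [PySem.Dict.contains_empty]) |>.trans (List.filter_true _)]
    simp [pvEmptyItems]
  have hA1keys : (a.items.foldl (pvStep "active") PySem.Dict.empty).keys = a.keys := by
    show (a.items.foldl (pvStep "active") PySem.Dict.empty).items.map Prod.fst = a.keys
    rw [hA1, List.map_map]
    exact List.map_congr_left (fun p _ => rfl)
  have hA1contains : ∀ x, (a.items.foldl (pvStep "active") PySem.Dict.empty).contains x = a.contains x := by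
    intro x
    rw [PySem.Dict.contains_eq_decide_mem_keys, PySem.Dict.contains_eq_decide_mem_keys, hA1keys]
  have hmkb : PySem.Dict.mk b.items = b := rfl
  -- second pass
  rw [pvFoldl_step_items "inactive" b.items _ hbkeys (by rw [show ((a.items.foldl (pvStep "active") PySem.Dict.empty).keys) = a.keys from hA1keys]; exact ha)]
  rw [hmkb, hA1, List.map_append, List.map_map, List.map_map]
  rw [pvMerged_eq, pvInactiveOnly_eq]
  congr 1
  rw [show b.items.filter (fun p => !(a.items.foldl (pvStep "active") PySem.Dict.empty).contains p.1)
      = b.items.filter (fun p => !(a.contains p.1)) from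
    List.filter_congr (fun p _ => by rw [hA1contains])]
  rw [List.map_map]
  rfl

-- ===== VERDICT (by name: the statement is the Claim_ definition above) =====
theorem response_bundle_spec : Claim_equal_response_bundle := by
  intro response _ _
  show response_bundle response = response_bundle_alt response
  rw [pvPortA_eq, pvPortB_eq]
  rw [pvAssemble _ _ (PySem.Dict.nodup_keys_ofList _) (PySem.Dict.nodup_keys_ofList _)]
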